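-- pv_equiv track=rewrite | github.com/boisvert4427/youtube-videos | video_generator/generate_atp_vertical_timeline_moviepy.py | _extract_result_parts
-- ===== SOURCE A (Python) =====
-- ROUNDS = ["R128", "R64", "R32", "R16", "QF", "SF", "F"]
--
-- def _extract_result_parts(line: str) -> tuple[str, str, str]:
--     text = line.strip()
--     if not text:
--         return ("", "", "")
--     tokens = text.split()
--     rnd = tokens[0] if tokens else ""
--     if rnd not in set(ROUNDS):
--         return ("", text, "")
--     rest = " ".join(tokens[1:]).strip()
--     if not rest:
--         return (rnd, "-", "")
--
--     parts = rest.split()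
--     score_parts: list[str] = []
--     while parts:
--         t = parts[-1]
--         if any(ch.isdigit() for ch in t) or "-" in t:
--             score_parts.insert(0, parts.pop())
--         else:
--             break
--     opponent = " ".join(parts).strip() or "-"
--     score = " ".join(score_parts).strip()
--     return (rnd, opponent, score)
-- ===== SOURCE B (Python) =====
-- ROUNDS = ["R128", "R64", "R32", "R16", "QF", "SF", "F"]
--
-- def _is_scoreish(tok):
--     return "-" in tok or any(c.isdigit() for c in tok)
--
-- def _split_opp_score(parts):
--     # Recursively split the token list: the score is the maximal score-like
--     # suffix, the opponent is everything before it.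
--     if not parts:
--         return [], []
--     opp, sc = _split_opp_score(parts[1:])
--     if opp or not _is_scoreish(parts[0]):
--         return [parts[0]] + opp, sc
--     return [], [parts[0]] + sc
--
-- def _extract_result_parts(line: str) -> tuple[str, str, str]:
--     text = line.strip()
--     if not text:
--         return ("", "", "")
--     tokens = text.split()
--     if tokens[0] not in ROUNDS:
--         return ("", text, "")
--     if len(tokens) == 1:
--         return (tokens[0], "-", "")
--     opp, sc = _split_opp_score(tokens[1:])
--     return (tokens[0], " ".join(opp) or "-", " ".join(sc))
-- ===== Notes on version B (the rewrite author's own statement) =====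
-- stated objective: alternative
-- what changed: B works on the token list directly (no join-then-re-split-then-strip round trip of the rest of the line, no set(ROUNDS)) and replaces A's stateful pop-from-the-tail/insert-at-front while-loop by a recursive helper that splits the tokens into opponent part and maximal score-like suffix in one structural pass.
import Mathlib
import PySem

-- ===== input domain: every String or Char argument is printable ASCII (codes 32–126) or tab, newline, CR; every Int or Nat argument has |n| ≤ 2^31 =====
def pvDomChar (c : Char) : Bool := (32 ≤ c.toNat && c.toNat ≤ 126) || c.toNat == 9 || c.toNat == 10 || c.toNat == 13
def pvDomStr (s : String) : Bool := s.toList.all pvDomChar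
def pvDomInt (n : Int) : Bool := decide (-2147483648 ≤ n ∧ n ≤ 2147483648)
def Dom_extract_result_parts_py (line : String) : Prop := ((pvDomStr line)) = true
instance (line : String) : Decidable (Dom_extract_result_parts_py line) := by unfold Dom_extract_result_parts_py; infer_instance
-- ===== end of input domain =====

-- B works on the token list directly (no join/re-split/strip round trip, no set(ROUNDS)) and replaces
-- A's pop-from-the-tail while-loop by a recursive opponent/score split of the tokens (alternative decomposition).

def pvROUNDS : List String := ["R128", "R64", "R32", "R16", "QF", "SF", "F"]

-- ===== PORT A =====
-- A's while-loop: pop score-like tokens (any(ch.isdigit()) or "-" in t) off the tail, inserting at the front of score_parts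
def pvAloop (parts acc : List String) : List String × List String :=
  if h : parts = [] then (parts, acc)
  else
    let t := parts.getLast h
    if (t.toList.any (fun ch => PySem.Chars.isdigit ch)) || PySem.Str.isIn "-" t then
      pvAloop parts.dropLast (t :: acc)
    else (parts, acc)
termination_by parts.length
decreasing_by
  simp only [List.length_dropLast]
  have := List.length_pos_of_ne_nil h
  omega

def extract_result_parts_py (line : String) : String × String × String :=
  let text := PySem.Str.strip line
  if text = "" then ("", "", "")
  else
    let tokens := PySem.Str.split₀ text
    let rnd := match tokens with | [] => "" | t0 :: _ => t0
    if !(PySem.Set.contains (PySem.Set.ofList pvROUNDS) rnd) then ("", text, "")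
    else
      let rest := PySem.Str.strip (PySem.Str.join " " (PySem.List.slice tokens (some 1) none))
      if rest = "" then (rnd, "-", "")
      else
        let parts := PySem.Str.split₀ rest
        let pr := pvAloop parts []
        let o := PySem.Str.strip (PySem.Str.join " " pr.1)
        let opponent := if o = "" then "-" else o
        let score := PySem.Str.strip (PySem.Str.join " " pr.2)
        (rnd, opponent, score)

-- ===== PORT B =====
def pvIsScoreish (tok : String) : Bool :=
  PySem.Str.isIn "-" tok || tok.toList.any (fun c => PySem.Chars.isdigit c)

-- B's recursive helper: score = maximal score-like suffix, opponent = everything before it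
def pvSplitOppScore : List String → List String × List String
  | [] => ([], [])
  | t :: rest =>
    let (opp, sc) := pvSplitOppScore rest
    if opp ≠ [] || !pvIsScoreish t then (t :: opp, sc) else ([], t :: sc)

def extract_result_parts_py_alt (line : String) : String × String × String :=
  let text := PySem.Str.strip line
  if text = "" then ("", "", "")
  else
    match PySem.Str.split₀ text with
    | [] => ("", "", "")  -- unreachable (tokens[0]: non-empty text splits into ≥ 1 token); totality case only
    | rnd :: parts =>
      if !(pvROUNDS.contains rnd) then ("", text, "")
      else if parts = [] then (rnd, "-", "")  -- len(tokens) == 1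
      else
        let pr := pvSplitOppScore parts
        let o := PySem.Str.join " " pr.1
        (rnd, if o = "" then "-" else o, PySem.Str.join " " pr.2)

-- ===== PRECONDITION & SPEC =====
def Spec_extract_result_parts_py (line : String) (out : String × String × String) : Prop := out = extract_result_parts_py_alt line
instance (line : String) (out : String × String × String) : Decidable (Spec_extract_result_parts_py line out) := by unfold Spec_extract_result_parts_py; infer_instance

-- ===== CLAIM (what is proved, stated in full; the proofs are below) =====
def Claim_equal_extract_result_parts_py : Prop := ∀ (line : String), Dom_extract_result_parts_py line → Spec_extract_result_parts_py line (extract_result_parts_py line)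

-- ===== LEMMAS AND PROOFS =====

-- a "word": non-empty, no whitespace characters (the shape of every token produced by str.split())
def pvWord (w : List Char) : Prop := w ≠ [] ∧ ∀ c ∈ w, PySem.Chars.isspace c = false

theorem pv_go_inv (s : List Char) : ∀ (cur : List Char) (acc : List (List Char)),
    (∀ w ∈ acc, pvWord w) → (∀ c ∈ cur, PySem.Chars.isspace c = false) →
    ∀ w ∈ PySem.Chars.split₀.go s cur acc, pvWord w := by
  induction s with
  | nil =>
      intro cur acc hacc hcur w hw
      rw [PySem.Chars.split₀.go] at hw
      by_cases hc : cur = []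
      · simp [hc] at hw; exact hacc w (by simpa using hw)
      · simp [List.isEmpty_iff, hc] at hw
        rcases hw with h | h
        · exact hacc w h
        · subst h; exact ⟨by simpa using hc, by intro c hc'; exact hcur c (by simpa using hc')⟩
  | cons c rest ih =>
      intro cur acc hacc hcur w hw
      rw [PySem.Chars.split₀.go] at hw
      by_cases hsp : PySem.Chars.isspace c = true
      · by_cases hc : cur = []
        · simp [hsp, hc] at hw
          exact ih [] acc hacc (by simp) w hw
        · simp [hsp, List.isEmpty_iff, hc] at hw
          refine ih [] _ ?_ (by simp) w hw
          intro v hv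
          rcases List.mem_cons.mp hv with h | h
          · subst h; exact ⟨by simpa using hc, by intro c' hc'; exact hcur c' (by simpa using hc')⟩
          · exact hacc v h
      · simp [hsp] at hw
        refine ih (c :: cur) acc hacc ?_ w hw
        intro v hv
        rcases List.mem_cons.mp hv with h | h
        · subst h; simpa using hsp
        · exact hcur v h

theorem pvWords_split₀ (s : List Char) : ∀ w ∈ PySem.Chars.split₀ s, pvWord w :=
  pv_go_inv s [] [] (by simp) (by simp)

theorem pv_go_ne_nil (s : List Char) : ∀ (cur : List Char) (acc : List (List Char)),
    (cur ≠ [] ∨ acc ≠ []) → PySem.Chars.split₀.go s cur acc ≠ [] := by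
  induction s with
  | nil =>
      intro cur acc h
      rw [PySem.Chars.split₀.go]
      by_cases hc : cur = []
      · simp [hc]; tauto
      · simp [List.isEmpty_iff, hc]
  | cons c rest ih =>
      intro cur acc h
      rw [PySem.Chars.split₀.go]
      by_cases hsp : PySem.Chars.isspace c = true
      · by_cases hc : cur = []
        · simp [hsp, hc]
          exact ih [] acc (Or.inr (by tauto))
        · simp [hsp, List.isEmpty_iff, hc]
          exact ih [] _ (Or.inr (by simp))
      · simp [hsp]
        exact ih (c :: cur) acc (Or.inl (by simp))

theorem pv_split₀_head_nonspace (c : Char) (rest : List Char) (hc : PySem.Chars.isspace c = false) :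
    PySem.Chars.split₀ (c :: rest) ≠ [] := by
  unfold PySem.Chars.split₀
  rw [PySem.Chars.split₀.go]
  simp [hc]
  exact pv_go_ne_nil rest [c] [] (Or.inl (by simp))

theorem pv_go_word_prefix (w : List Char) : ∀ (s cur : List Char) (acc : List (List Char)),
    (∀ c ∈ w, PySem.Chars.isspace c = false) →
    PySem.Chars.split₀.go (w ++ s) cur acc = PySem.Chars.split₀.go s (w.reverse ++ cur) acc := by
  induction w with
  | nil => intro s cur acc _; simp
  | cons c w ih =>
      intro s cur acc hw
      have hc : PySem.Chars.isspace c = false := hw c (by simp)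
      rw [List.cons_append, PySem.Chars.split₀.go]
      simp [hc]
      rw [ih s (c :: cur) acc (fun c' h => hw c' (by simp [h]))]

theorem pv_join_cons_cons (w v : List Char) (vs : List (List Char)) :
    PySem.Chars.join [' '] (w :: v :: vs) = w ++ ' ' :: PySem.Chars.join [' '] (v :: vs) := by
  simp [PySem.Chars.join, List.intercalate, List.intersperse]

theorem pv_go_join (ws : List (List Char)) : ∀ (acc : List (List Char)),
    (∀ w ∈ ws, pvWord w) →
    PySem.Chars.split₀.go (PySem.Chars.join [' '] ws) [] acc = acc.reverse ++ ws := by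
  induction ws with
  | nil =>
      intro acc _
      simp [PySem.Chars.join, List.intercalate]
      rw [PySem.Chars.split₀.go]
      simp
  | cons w ws ih =>
      intro acc hws
      have hw : pvWord w := hws w (by simp)
      cases ws with
      | nil =>
          have : PySem.Chars.join [' '] [w] = w := by simp [PySem.Chars.join, List.intercalate]
          rw [this]
          have := pv_go_word_prefix w [] [] acc hw.2
          simp at this
          rw [this, PySem.Chars.split₀.go]
          simp [List.isEmpty_iff, hw.1]
      | cons v vs =>
          rw [pv_join_cons_cons]
          rw [show w ++ ' ' :: PySem.Chars.join [' '] (v :: vs)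
              = w ++ (' ' :: PySem.Chars.join [' '] (v :: vs)) from rfl]
          rw [pv_go_word_prefix w _ [] acc hw.2]
          rw [PySem.Chars.split₀.go]
          have hsp : PySem.Chars.isspace ' ' = true := by decide
          simp [hsp, List.isEmpty_iff, hw.1]
          rw [ih (w :: acc) (fun u hu => hws u (by simp [hu]))]
          simp

theorem pv_split₀_join (ws : List (List Char)) (hws : ∀ w ∈ ws, pvWord w) :
    PySem.Chars.split₀ (PySem.Chars.join [' '] ws) = ws := by
  unfold PySem.Chars.split₀
  rw [pv_go_join ws [] hws]
  simp

theorem pv_join_cons (w : List Char) (ws : List (List Char)) :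
    ∃ t, PySem.Chars.join [' '] (w :: ws) = w ++ t := by
  cases ws with
  | nil => exact ⟨[], by simp [PySem.Chars.join, List.intercalate]⟩
  | cons v vs =>
      exact ⟨' ' :: PySem.Chars.join [' '] (v :: vs), by
        simp [PySem.Chars.join, List.intercalate, List.intersperse]⟩

theorem pv_join_ne_nil (ws : List (List Char)) (hws : ∀ w ∈ ws, pvWord w) (h : ws ≠ []) :
    PySem.Chars.join [' '] ws ≠ [] := by
  cases ws with
  | nil => exact absurd rfl h
  | cons w ws =>
      obtain ⟨t, ht⟩ := pv_join_cons w ws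
      rw [ht]
      have := (hws w (by simp)).1
      simp [this]

theorem pv_join_last (ws : List (List Char)) (hws : ∀ w ∈ ws, pvWord w) (h : ws ≠ []) :
    ∃ c, (PySem.Chars.join [' '] ws).getLast? = some c ∧ PySem.Chars.isspace c = false := by
  induction ws with
  | nil => exact absurd rfl h
  | cons w ws ih =>
      cases ws with
      | nil =>
          have hw := hws w (by simp)
          have hj : PySem.Chars.join [' '] [w] = w := by simp [PySem.Chars.join, List.intercalate]
          rw [hj]
          cases hl : w.getLast? with
          | none => exact absurd (List.getLast?_eq_none_iff.mp hl) hw.1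
          | some c => exact ⟨c, rfl, hw.2 c (List.mem_of_getLast? hl)⟩
      | cons v vs =>
          obtain ⟨c, hc, hsp⟩ := ih (fun u hu => hws u (by simp [hu])) (by simp)
          refine ⟨c, ?_, hsp⟩
          rw [pv_join_cons_cons, List.getLast?_append]
          rw [show (' ' :: PySem.Chars.join [' '] (v :: vs)) = [' '] ++ PySem.Chars.join [' '] (v :: vs) from rfl,
              List.getLast?_append]
          simp [hc]

theorem pv_join_head (ws : List (List Char)) (hws : ∀ w ∈ ws, pvWord w) (h : ws ≠ []) :
    ∃ c, (PySem.Chars.join [' '] ws).head? = some c ∧ PySem.Chars.isspace c = false := by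
  cases ws with
  | nil => exact absurd rfl h
  | cons w ws =>
      have hw := hws w (by simp)
      obtain ⟨t, ht⟩ := pv_join_cons w ws
      cases hw' : w with
      | nil => exact absurd hw' hw.1
      | cons c cs =>
          exact ⟨c, by rw [hw'] at ht; rw [ht]; simp, hw.2 c (by simp [hw'])⟩

theorem pv_strip_of_ends (l : List Char)
    (hh : ∀ c, l.head? = some c → PySem.Chars.isspace c = false)
    (hl : ∀ c, l.getLast? = some c → PySem.Chars.isspace c = false) :
    PySem.Chars.strip l = l := by
  cases l with
  | nil => simp [PySem.Chars.strip, PySem.Chars.lstrip, PySem.Chars.rstrip]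
  | cons c cs =>
      have hc : PySem.Chars.isspace c = false := hh c rfl
      unfold PySem.Chars.strip PySem.Chars.lstrip PySem.Chars.rstrip
      rw [List.dropWhile_cons]
      simp only [hc, Bool.false_eq_true, if_false]
      cases hr : (c :: cs).reverse with
      | nil => simp at hr
      | cons d ds =>
          have hd : (c :: cs).getLast? = some d := by
            rw [← List.head?_reverse, hr]; rfl
          have hdw : List.dropWhile PySem.Chars.isspace ((c :: cs).reverse) = (c :: cs).reverse := by
            rw [hr, List.dropWhile_cons]; simp [hl d hd]
          rw [← hr, hdw, List.reverse_reverse]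

theorem pv_strip_join (ws : List (List Char)) (hws : ∀ w ∈ ws, pvWord w) :
    PySem.Chars.strip (PySem.Chars.join [' '] ws) = PySem.Chars.join [' '] ws := by
  cases hn : ws with
  | nil => simp [PySem.Chars.join, List.intercalate, PySem.Chars.strip, PySem.Chars.lstrip, PySem.Chars.rstrip]
  | cons w ws' =>
      subst hn
      apply pv_strip_of_ends
      · intro c hc
        obtain ⟨c', hc', hsp⟩ := pv_join_head _ hws (by simp)
        rw [hc] at hc'; injection hc' with h; subst h; exact hsp
      · intro c hc
        obtain ⟨c', hc', hsp⟩ := pv_join_last _ hws (by simp)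
        rw [hc] at hc'; injection hc' with h; subst h; exact hsp

theorem pv_strip_shape (l : List Char) (h : PySem.Chars.strip l ≠ []) :
    ∃ c t, PySem.Chars.strip l = c :: t ∧ PySem.Chars.isspace c = false := by
  have hdef : PySem.Chars.strip l = (List.dropWhile PySem.Chars.isspace
      (List.dropWhile PySem.Chars.isspace l).reverse).reverse := rfl
  set L := List.dropWhile PySem.Chars.isspace l with hL
  set D := List.dropWhile PySem.Chars.isspace L.reverse with hD
  have hsuff : D <:+ L.reverse := List.dropWhile_suffix _
  obtain ⟨pre, hpre⟩ := hsuff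
  have hLrec : L = D.reverse ++ pre.reverse := by
    rw [← List.reverse_reverse L, ← hpre]; simp
  cases hDr : D.reverse with
  | nil => rw [hdef, hDr] at h; exact absurd rfl h
  | cons c t =>
      refine ⟨c, t, by rw [hdef, hDr], ?_⟩
      have hLne : L ≠ [] := by rw [hLrec, hDr]; simp
      have hhead : L.head? = some c := by rw [hLrec, hDr]; simp
      have h2 : PySem.Chars.isspace (L.head hLne) = false :=
        List.head_dropWhile_not PySem.Chars.isspace (l := l) hLne
      have h3 : L.head hLne = c := by
        have h4 := List.head?_eq_some_head hLne
        rw [hhead] at h4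
        exact (Option.some_inj.mp h4.symm)
      rwa [h3] at h2

theorem pv_pred (t : String) :
    ((t.toList.any (fun ch => PySem.Chars.isdigit ch)) || PySem.Str.isIn "-" t) = pvIsScoreish t := by
  simp [pvIsScoreish, Bool.or_comm]

theorem pvAloop_eq (ps acc : List String) :
    pvAloop ps acc =
      ((ps.reverse.dropWhile pvIsScoreish).reverse,
       (ps.reverse.takeWhile pvIsScoreish).reverse ++ acc) := by
  induction ps using List.reverseRecOn generalizing acc with
  | nil => simp [pvAloop]
  | append_singleton xs x ih =>
      rw [pvAloop]
      simp only [pv_pred]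
      cases hp : pvIsScoreish x with
      | false =>
          simp [hp]
      | true =>
          simp only [List.reverse_append, List.reverse_cons, List.reverse_nil,
            List.nil_append, List.cons_append, List.dropWhile_cons, List.takeWhile_cons, hp]
          simp [hp, ih]

theorem pvSplitOppScore_eq (ps : List String) :
    pvSplitOppScore ps =
      ((ps.reverse.dropWhile pvIsScoreish).reverse,
       (ps.reverse.takeWhile pvIsScoreish).reverse) := by
  induction ps with
  | nil => simp [pvSplitOppScore]
  | cons t rest ih =>
      rw [pvSplitOppScore, ih]
      simp only [List.reverse_cons, List.dropWhile_append, List.takeWhile_append]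
      by_cases hd : rest.reverse.dropWhile pvIsScoreish = []
      · have hall : ∀ x ∈ rest.reverse, pvIsScoreish x = true := by
          intro x hx
          have := List.dropWhile_eq_nil_iff.mp hd
          exact this x hx
        have htw : List.takeWhile pvIsScoreish rest.reverse = rest.reverse := by
          apply List.takeWhile_eq_self_iff.mpr hall
        cases hp : pvIsScoreish t with
        | false => simp [hd, hp, htw]
        | true => simp [hd, hp, htw]
      · simp [hd]
        intro hlen
        exfalso
        have hpre := List.takeWhile_prefix (p := pvIsScoreish) (l := rest.reverse)
        have heq : List.takeWhile pvIsScoreish rest.reverse = rest.reverse :=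
          List.IsPrefix.eq_of_length hpre (by simpa using hlen)
        have hsplit := List.takeWhile_append_dropWhile (p := pvIsScoreish) (l := rest.reverse)
        rw [heq] at hsplit
        have h0 : rest.reverse ++ List.dropWhile pvIsScoreish rest.reverse = rest.reverse ++ [] := by
          simpa using hsplit
        exact hd (List.append_cancel_left h0)

theorem pvSet_rounds : PySem.Set.ofList pvROUNDS = pvROUNDS :=
  PySem.Set.ofList_eq_self_of_nodup (xs := pvROUNDS) (by decide)

theorem pv_str_strip_join (us : List String) (h : ∀ u ∈ us, pvWord u.toList) :
    PySem.Str.strip (PySem.Str.join " " us) = PySem.Str.join " " us := by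
  apply String.ext
  rw [PySem.Str.toList_strip, PySem.Str.toList_join]
  rw [show (" " : String).toList = [' '] from rfl]
  apply pv_strip_join
  intro w hw
  obtain ⟨u, hu, rfl⟩ := List.mem_map.mp hw
  exact h u hu

-- ===== VERDICT (by name: the statement is the Claim_ definition above) =====
theorem extract_result_parts_py_spec : Claim_equal_extract_result_parts_py := by
  intro line _
  unfold Spec_extract_result_parts_py extract_result_parts_py extract_result_parts_py_alt
  by_cases ht : PySem.Str.strip line = ""
  · simp [ht]
  · have htl : (PySem.Str.strip line).toList ≠ [] := by
      intro h; exact ht (String.ext (by simpa using h))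
    have htl2 : (PySem.Str.strip line).toList = PySem.Chars.strip line.toList :=
      PySem.Str.toList_strip line
    obtain ⟨c, t, hct, hcsp⟩ := pv_strip_shape line.toList (by rw [← htl2]; exact htl)
    have hsp0 : PySem.Chars.split₀ (PySem.Str.strip line).toList ≠ [] := by
      rw [htl2, hct]; exact pv_split₀_head_nonspace c t hcsp
    have hmap : List.map String.toList (PySem.Str.split₀ (PySem.Str.strip line))
        = PySem.Chars.split₀ (PySem.Str.strip line).toList :=
      PySem.Str.split₀_map_toList _
    cases htok : PySem.Str.split₀ (PySem.Str.strip line) with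
    | nil => rw [htok] at hmap; exact absurd hmap.symm (by simpa using hsp0)
    | cons rnd parts =>
        simp only [ht, if_false, htok]
        rw [pvSet_rounds]
        rw [show ∀ x, PySem.Set.contains pvROUNDS x = pvROUNDS.contains x from fun _ => rfl]
        by_cases hr : pvROUNDS.contains rnd
        · simp only [hr, Bool.not_true, Bool.false_eq_true, if_false]
          have hslice : PySem.List.slice (rnd :: parts) (some 1) none = parts := by
            rw [PySem.List.slice_from _ (by norm_num : (0:Int) ≤ 1)]
            simp
          rw [hslice]
          have hwtok : ∀ u ∈ rnd :: parts, pvWord u.toList := by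
            intro u hu
            refine pvWords_split₀ (PySem.Str.strip line).toList u.toList ?_
            rw [← hmap, htok]
            exact List.mem_map_of_mem hu
          have hwparts : ∀ u ∈ parts, pvWord u.toList := fun u hu => hwtok u (by simp [hu])
          rw [pv_str_strip_join parts hwparts]
          cases parts with
          | nil =>
              have hj0 : PySem.Str.join " " ([] : List String) = "" := by
                apply String.ext
                rw [PySem.Str.toList_join]
                simp [PySem.Chars.join, List.intercalate]
              simp [hj0]
          | cons p ps =>
              have hwords : ∀ w ∈ List.map String.toList (p :: ps), pvWord w := by
                intro w hw
                obtain ⟨u, hu, rfl⟩ := List.mem_map.mp hw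
                exact hwparts u hu
              have hjne : PySem.Str.join " " (p :: ps) ≠ "" := by
                intro h
                have : (PySem.Str.join " " (p :: ps)).toList = [] := by rw [h]; rfl
                rw [PySem.Str.toList_join, show (" " : String).toList = [' '] from rfl] at this
                exact
                  pv_join_ne_nil (List.map String.toList (p :: ps)) hwords (by simp) this
              simp only [hjne, if_false, show (p :: ps ≠ []) from by simp]
              have hinner : PySem.Str.split₀ (PySem.Str.join " " (p :: ps)) = p :: ps := by
                have hm : List.map String.toList (PySem.Str.split₀ (PySem.Str.join " " (p :: ps)))
                    = List.map String.toList (p :: ps) := by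
                  rw [PySem.Str.split₀_map_toList, PySem.Str.toList_join,
                      show (" " : String).toList = [' '] from rfl]
                  exact pv_split₀_join _ hwords
                exact List.map_injective_iff.mpr (fun a b hab => String.toList_inj.mp hab) hm
              rw [hinner, pvAloop_eq, pvSplitOppScore_eq]
              have hwopp : ∀ u ∈ (List.dropWhile pvIsScoreish (p :: ps).reverse).reverse, pvWord u.toList := by
                intro u hu
                refine hwparts u ?_
                rw [List.mem_reverse] at hu
                exact List.mem_reverse.mp ((List.dropWhile_sublist _).mem hu)
              have hwsc : ∀ u ∈ (List.takeWhile pvIsScoreish (p :: ps).reverse).reverse, pvWord u.toList := by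
                intro u hu
                refine hwparts u ?_
                rw [List.mem_reverse] at hu
                exact List.mem_reverse.mp ((List.takeWhile_sublist _).mem hu)
              simp only [List.append_nil]
              rw [pv_str_strip_join _ hwopp, pv_str_strip_join _ hwsc]
        · simp [show rnd ∉ pvROUNDS from by simpa using hr]
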